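-- pv_equiv track=rewrite | github.com/deh-sys/modern-document-converter-for-ai-library | src/services/code_generator.py | format_code_range
-- ===== SOURCE A (Python) =====
-- ALPHABET = "ABCDEFGHIJKLMNOPQRSTUVXYZ"  # No 'W'
--
-- CODE_LENGTH = 5
--
-- def index_to_code(idx: int) -> str:
--     """
--     Convert integer index to 5-letter code using base-25 encoding.
--
--     Algorithm (ported from step2/filename_indexer.py):
--         1. Take index (0, 1, 2, ..., 9,765,624)
--         2. Convert to base-25 representation
--         3. Map each digit to alphabet (A=0, B=1, ..., Z=24, skip W)
--         4. Build 5-letter code from right to left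
--         5. Reverse to get proper order
--
--     Args:
--         idx: Integer index (0-9,765,624)
--
--     Returns:
--         5-letter code string (e.g., "AAAAA", "AAAAB", "BCDEZ")
--
--     Raises:
--         RuntimeError: If index exceeds maximum (registry exhausted)
--
--     Examples:
--         >>> index_to_code(0)
--         'AAAAA'
--         >>> index_to_code(1)
--         'AAAAB'
--         >>> index_to_code(24)
--         'AAAAZ'
--         >>> index_to_code(25)
--         'AAABA'
--     """
--     base = len(ALPHABET)  # 25
--     limit = base ** CODE_LENGTH  # 9,765,625
--
--     if idx >= limit:
--         raise RuntimeError(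
--             f"Registry exhausted: index {idx} exceeds maximum {limit - 1}. "
--             f"No more unique codes available."
--         )
--
--     if idx < 0:
--         raise ValueError(f"Index must be non-negative, got: {idx}")
--
--     # Build digits from right to left (least significant to most significant)
--     digits: list[str] = []
--     for _ in range(CODE_LENGTH):
--         digits.append(ALPHABET[idx % base])
--         idx //= base
--
--     # Reverse to get proper order (most significant digit first)
--     return "".join(reversed(digits))
--
-- def format_code_range(start_index: int, count: int = 10) -> list[str]:
--     """
--     Generate a range of codes for display/testing.
--
--     Args:
--         start_index: Starting index
--         count: Number of codes to generate
--
--     Returns: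
--         List of codes
--
--     Example:
--         >>> format_code_range(0, 5)
--         ['AAAAA', 'AAAAB', 'AAAAC', 'AAAAD', 'AAAAE']
--     """
--     codes = []
--     for i in range(start_index, start_index + count):
--         try:
--             codes.append(index_to_code(i))
--         except RuntimeError:
--             break
--     return codes
-- ===== SOURCE B (Python) =====
-- ALPHABET = "ABCDEFGHIJKLMNOPQRSTUVXYZ"  # No 'W'
--
-- CODE_LENGTH = 5
--
-- def format_code_range(start_index: int, count: int = 10) -> list[str]:
--     """Odometer: compute the base-25 digits of start_index once, then emit
--     codes while incrementing the digit list in place (carry leftward)."""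
--     base = len(ALPHABET)
--     limit = base ** CODE_LENGTH
--     if start_index < 0:
--         raise ValueError(f"Index must be non-negative, got: {start_index}")
--     if start_index >= limit:
--         return []
--     digits = []
--     x = start_index
--     for _ in range(CODE_LENGTH):
--         digits.append(x % base)
--         x //= base
--     digits.reverse()
--     codes = []
--     for _ in range(count):
--         codes.append("".join(ALPHABET[d] for d in digits))
--         j = CODE_LENGTH - 1
--         while j >= 0:
--             digits[j] += 1
--             if digits[j] < base:
--                 break
--             digits[j] = 0
--             j -= 1
--         else:
--             break  # odometer overflow: registry exhausted
--     return codes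
-- ===== Notes on version B (the rewrite author's own statement) =====
-- stated objective: faster
-- what changed: B computes the base-25 digit list of start_index once and then increments it odometer-style (carry leftward) per emitted code, instead of A's full 5-step divmod conversion for every index; odometer overflow stops exactly where A's RuntimeError breaks.
-- outside the precondition, e.g. on format_code_range(-1, 0): A returns [], B raises ValueError
import Mathlib
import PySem

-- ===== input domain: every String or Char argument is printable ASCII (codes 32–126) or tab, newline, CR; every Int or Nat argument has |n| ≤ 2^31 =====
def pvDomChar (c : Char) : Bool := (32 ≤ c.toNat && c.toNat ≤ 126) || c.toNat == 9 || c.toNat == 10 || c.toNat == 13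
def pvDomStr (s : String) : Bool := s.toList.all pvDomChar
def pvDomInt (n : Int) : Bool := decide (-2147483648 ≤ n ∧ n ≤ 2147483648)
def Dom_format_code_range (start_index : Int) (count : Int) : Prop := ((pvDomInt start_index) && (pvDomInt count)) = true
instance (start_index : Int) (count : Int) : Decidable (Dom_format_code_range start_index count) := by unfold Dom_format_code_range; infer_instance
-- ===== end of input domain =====

-- Header: B converts start_index to base-25 digits once and increments them odometer-style per
-- code (measurably faster per code: one amortized increment instead of a 5-step divmod chain); A converts every index from scratch. Equivalence is about the
-- return value; Pre_ excludes negative start_index, where B validates up front and raises.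


-- ===== PORT A =====
-- ALPHABET = "ABCDEFGHIJKLMNOPQRSTUVXYZ" (no 'W'), as a char list
def alphabetL : List Char :=
  ['A','B','C','D','E','F','G','H','I','J','K','L','M','N','O','P','Q','R','S','T','U','V','X','Y','Z']

-- ALPHABET[d]; in both programs d = x % 25 is always in range, so getD is never the default
def alphaGet (d : Int) : Char := (PySem.List.pyGet? alphabetL d).getD '?'

-- index_to_code: none = RuntimeError (idx >= limit).  The idx < 0 ValueError is NOT caught by the
-- caller's except; such inputs are outside Pre_, so this port just runs the digit loop there.
def indexToCode? (idx : Int) : Option String :=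
  if 9765625 ≤ idx then none
  else
    let st := (List.range 5).foldl
      (fun (st : List Char × Int) _ =>
        (st.1 ++ [alphaGet (PySem.Int.mod st.2 25)], PySem.Int.floordiv st.2 25)) ([], idx)
    some (String.ofList st.1.reverse)

-- the for-loop with try/except RuntimeError: break
def goA : List Int → List String → List String
  | [], codes => codes
  | i :: rest, codes =>
    match indexToCode? i with
    | none => codes
    | some s => goA rest (codes ++ [s])

def format_code_range (start_index : Int) (count : Int) : List String :=
  goA (PySem.List.pyRange start_index (start_index + count) 1) []

-- ===== PORT B =====
-- base-25 digits of x, most significant first (the two divmod loops + reverse of Source B)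
def digitsOf (x : Int) : List Int :=
  ((List.range 5).foldl
    (fun (st : List Int × Int) _ =>
      (st.1 ++ [PySem.Int.mod st.2 25], PySem.Int.floordiv st.2 25)) ([], x)).1.reverse

-- "".join(ALPHABET[d] for d in digits)
def codeOf (ds : List Int) : String := String.ofList (ds.map alphaGet)

-- the j = 4 .. 0 while loop: carry from the rightmost digit; none = overflow (while/else break)
def incRev : List Int → Option (List Int)
  | [] => none
  | d :: rest => if d + 1 < 25 then some ((d + 1) :: rest) else (incRev rest).map (0 :: ·)

def incDigits (ds : List Int) : Option (List Int) := (incRev ds.reverse).map List.reverse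

def goB : Nat → List Int → List String → List String
  | 0, _, codes => codes
  | n + 1, ds, codes =>
    match incDigits ds with
    | some ds' => goB n ds' (codes ++ [codeOf ds])
    | none => codes ++ [codeOf ds]

def format_code_range_alt (start_index : Int) (count : Int) : List String :=
  if start_index < 0 then []        -- Python B raises ValueError here; outside Pre_
  else if 9765625 ≤ start_index then []
  else goB count.toNat (digitsOf start_index) []

-- ===== PRECONDITION & SPEC =====
-- Pre_ excludes start_index < 0: there A raises ValueError when count ≥ 1, and for count ≤ 0 A
-- returns [] while B's up-front validation raises ValueError (B never reaches its loop).
def Pre_format_code_range (start_index : Int) (count : Int) : Prop := 0 ≤ start_index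
instance (start_index : Int) (count : Int) : Decidable (Pre_format_code_range start_index count) := by unfold Pre_format_code_range; infer_instance

def pvWitness_format_code_range : Int × Int := (3, 4)

def Spec_format_code_range (start_index : Int) (count : Int) (out : List String) : Prop := out = format_code_range_alt start_index count
instance (start_index : Int) (count : Int) (out : List String) : Decidable (Spec_format_code_range start_index count out) := by unfold Spec_format_code_range; infer_instance

-- ===== CLAIM (what is proved, stated in full; the proofs are below) =====
def Claim_equal_format_code_range : Prop := ∀ (start_index : Int) (count : Int), Dom_format_code_range start_index count → Pre_format_code_range start_index count → Spec_format_code_range start_index count (format_code_range start_index count)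

-- ===== LEMMAS AND PROOFS =====

-- A's per-index conversion, for an in-range index, is B's digit list rendered through codeOf
theorem indexToCode?_eq_some (i : Int) (h : i < 9765625) :
    indexToCode? i = some (codeOf (digitsOf i)) := by
  simp [indexToCode?, digitsOf, codeOf, List.range, List.range.loop,
    if_neg (by omega : ¬ 9765625 ≤ i)]

-- odometer correctness: incrementing the digits of i gives the digits of i+1, or overflow at limit
theorem incDigits_digitsOf (i : Int) (h0 : 0 ≤ i) (h : i < 9765625) :
    incDigits (digitsOf i) = if i + 1 < 9765625 then some (digitsOf (i + 1)) else none := by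
  simp only [digitsOf, incDigits, incRev, List.range, List.range.loop, List.foldl,
    List.reverse_cons, List.reverse_nil, List.nil_append, List.cons_append,
    PySem.Int.mod_eq_emod_of_pos (by norm_num : (0 : Int) < 25),
    PySem.Int.floordiv_eq_ediv_of_pos (by norm_num : (0 : Int) < 25)]
  split_ifs <;> simp_all <;> omega

-- once the index reaches the limit, A's loop breaks at once whatever remains of the range
theorem goA_stop (i stop : Int) (hi : 9765625 ≤ i) (codes : List String) :
    goA (PySem.List.pyRange i stop 1) codes = codes := by
  rcases le_or_gt stop i with hle | hlt
  · simp [pysem, hle, goA]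
  · rw [PySem.List.pyRange_one_cons hlt]
    simp [goA, indexToCode?, if_pos hi]

-- main loop invariant: A's per-index loop and B's odometer loop agree step for step
theorem main_loop (n : Nat) (i : Int) (h0 : 0 ≤ i) (h : i < 9765625) (codes : List String) :
    goA (PySem.List.pyRange i (i + n) 1) codes = goB n (digitsOf i) codes := by
  induction n generalizing i codes with
  | zero => simp [pysem, goA, goB]
  | succ n ih =>
    rw [PySem.List.pyRange_one_cons (by push_cast; omega)]
    show goA _ _ = goB (n + 1) _ _
    unfold goA goB
    rw [indexToCode?_eq_some i h, incDigits_digitsOf i h0 h]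
    by_cases h1 : i + 1 < 9765625
    · rw [if_pos h1]
      have : i + ((n : Int) + 1) = (i + 1) + (n : Int) := by ring
      simp only [Nat.cast_add, Nat.cast_one, this]
      exact ih (i + 1) (by omega) h1 _
    · rw [if_neg h1]
      exact goA_stop (i + 1) _ (by omega) _

-- ===== VERDICT (by name: the statement is the Claim_ definition above) =====
theorem format_code_range_spec : Claim_equal_format_code_range := by
  intro s c _ hpre
  unfold Spec_format_code_range format_code_range format_code_range_alt
  have hs0 : ¬ s < 0 := not_lt.mpr hpre
  rw [if_neg hs0]
  by_cases hlim : 9765625 ≤ s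
  · rw [if_pos hlim]; exact goA_stop s _ hlim []
  · rw [if_neg hlim]
    rcases le_or_gt c 0 with hc | hc
    · have h1 : c.toNat = 0 := Int.toNat_of_nonpos hc
      have h2 : s + c ≤ s := by omega
      rw [h1]
      simp [pysem, h2, goA, goB]
    · have hcast : (c.toNat : Int) = c := Int.toNat_of_nonneg (le_of_lt hc)
      rw [← hcast]
      exact main_loop c.toNat s hpre (lt_of_not_ge hlim) []
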